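-- pv_equiv track=rewrite | github.com/k-minsik/Algorithm | py/main.py | solution
-- ===== SOURCE A (Python) =====
-- def solution(input_string):
--     answer = ''
--     input_string = input_string
--     for i in range(len(input_string)):
--         if input_string[i] != ' ':
--             c = input_string.count(input_string[i])
--             if c > 1:
--                 if input_string.rfind(input_string[i]) - i > c-1:
--                     answer += input_string[i]
--             input_string = input_string.replace(input_string[i], ' ')
--
--
--     return "".join(sorted(answer)) if answer else 'N'
-- ===== SOURCE B (Python) =====
-- def solution(input_string):
--     seen = {}
--     for i, ch in enumerate(input_string):
--         if ch == ' ':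
--             continue
--         if ch in seen:
--             f, l, c = seen[ch]
--             seen[ch] = (f, i, c + 1)
--         else:
--             seen[ch] = (i, i, 1)
--     res = sorted(ch for ch, (f, l, c) in seen.items() if c > 1 and l - f > c - 1)
--     return ''.join(res) if res else 'N'
-- ===== Notes on version B (the rewrite author's own statement) =====
-- stated objective: alternative
-- what changed: A rescans the whole (repeatedly rewritten) string with count/rfind/replace at every index; B makes one pass recording (first index, last index, count) per character in a dict and then filters and sorts the distinct characters.
import Mathlib
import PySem

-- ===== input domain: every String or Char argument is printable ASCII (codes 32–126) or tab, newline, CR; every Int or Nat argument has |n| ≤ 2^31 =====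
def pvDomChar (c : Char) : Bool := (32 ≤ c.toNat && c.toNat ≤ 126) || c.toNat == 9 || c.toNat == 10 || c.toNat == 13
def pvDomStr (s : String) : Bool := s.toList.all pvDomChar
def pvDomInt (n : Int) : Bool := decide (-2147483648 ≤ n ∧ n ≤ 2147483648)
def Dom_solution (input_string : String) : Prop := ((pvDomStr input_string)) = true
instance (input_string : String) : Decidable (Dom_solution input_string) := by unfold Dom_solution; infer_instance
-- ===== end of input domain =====

-- B replaces A's per-index count/rfind/replace rescans of the rewritten string by a single
-- pass recording (first index, last index, count) per character in a dict (objective: alternative).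

-- ===== PORT A =====
def solutionStepA (st : List Char × List Char) (i : Int) : List Char × List Char :=
  match PySem.List.pyGet? st.2 i with
  | none => st  -- unreachable: i ranges over range(len(input_string)) and len is preserved
  | some ch =>
    if ch ≠ ' ' then
      let c := PySem.Chars.count st.2 [ch]
      let answer :=
        if c > 1 then
          if PySem.Chars.rfind st.2 [ch] - i > (c : Int) - 1 then st.1 ++ [ch] else st.1
        else st.1
      (answer, PySem.Chars.replace st.2 [ch] [' '])
    else st

def solution (input_string : String) : String :=
  let s0 := input_string.toList
  let r := (PySem.List.pyRange 0 (PySem.Chars.len s0) 1).foldl solutionStepA ([], s0)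
  if r.1 = [] then "N" else String.ofList (PySem.List.sorted r.1 (fun x => x) false)

-- ===== PORT B =====
def solutionStepB (seen : PySem.Dict Char (Int × Int × Int)) (p : Int × Char) :
    PySem.Dict Char (Int × Int × Int) :=
  if p.2 == ' ' then seen
  else
    match seen.get? p.2 with
    | some (f, _, c) => seen.insert p.2 (f, p.1, c + 1)
    | none => seen.insert p.2 (p.1, p.1, 1)

def solution_alt (input_string : String) : String :=
  let seen := (PySem.List.enumerate input_string.toList 0).foldl solutionStepB PySem.Dict.empty
  let res := PySem.List.sorted
      ((seen.items.filter (fun q => q.2.2.2 > 1 && q.2.2.1 - q.2.1 > q.2.2.2 - 1)).map (·.1))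
      (fun x => x) false
  if res = [] then "N" else String.ofList res

-- ===== PRECONDITION & SPEC =====
def Spec_solution (input_string : String) (out : String) : Prop := out = solution_alt input_string
instance (input_string : String) (out : String) : Decidable (Spec_solution input_string out) := by unfold Spec_solution; infer_instance

-- ===== CLAIM (what is proved, stated in full; the proofs are below) =====
def Claim_equal_solution : Prop := ∀ (input_string : String), Dom_solution input_string → Spec_solution input_string (solution input_string)

-- ===== LEMMAS AND PROOFS =====

theorem prefix_single (c : Char) (t : List Char) :
    [c].isPrefixOf t = (t.head? == some c) := by
  cases t with
  | nil => simp [List.isPrefixOf]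
  | cons h t =>
    simp only [List.isPrefixOf, List.head?_cons]
    by_cases h' : c = h
    · subst h'; simp
    · simp [h', Ne.symm h']

theorem count_go_single (c : Char) (t : List Char) : ∀ (fuel acc : Nat), t.length ≤ fuel →
    PySem.Chars.count.go [c] fuel t acc = acc + t.count c := by
  induction t with
  | nil => intro fuel acc _; cases fuel <;> simp [PySem.Chars.count.go]
  | cons h t ih =>
    intro fuel acc hf
    cases fuel with
    | zero => simp at hf
    | succ f =>
      have hf' : t.length ≤ f := by simpa using hf
      rw [PySem.Chars.count.go]
      rw [prefix_single]
      by_cases hc : h = c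
      · subst hc
        simp [ih f (acc+1) hf']
        omega
      · have hb : ((h :: t).head? == some c) = false := by simp [hc]
        rw [hb]
        simp only [ih f acc hf', List.count_cons]
        simp [hc]

theorem count_single (t : List Char) (c : Char) : PySem.Chars.count t [c] = t.count c := by
  simp [PySem.Chars.count, count_go_single c t t.length 0 le_rfl]

theorem replace_go_single (c d : Char) (t : List Char) : ∀ (fuel : Nat) (acc : List Char),
    t.length ≤ fuel →
    PySem.Chars.replace.go [c] [d] fuel t acc
      = acc.reverse ++ t.map (fun x => if x = c then d else x) := by
  induction t with
  | nil => intro fuel acc _; cases fuel <;> simp [PySem.Chars.replace.go]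
  | cons h t ih =>
    intro fuel acc hf
    cases fuel with
    | zero => simp at hf
    | succ f =>
      have hf' : t.length ≤ f := by simpa using hf
      rw [PySem.Chars.replace.go, prefix_single]
      by_cases hc : h = c
      · subst hc
        simp [ih f _ hf']
      · have hb : ((h :: t).head? == some c) = false := by simp [hc]
        rw [hb]
        simp [ih f _ hf', hc]

theorem replace_single (t : List Char) (c d : Char) :
    PySem.Chars.replace t [c] [d] = t.map (fun x => if x = c then d else x) := by
  simp [PySem.Chars.replace, replace_go_single c d t t.length [] le_rfl]

theorem rfind_go_get (t : List Char) (c : Char) (j : Nat) (h : t[j]? = some c) :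
    PySem.Chars.rfind.go t [c] j = j := by
  have hj : j < t.length := by
    by_contra hh
    rw [List.getElem?_eq_none (Nat.le_of_not_lt hh)] at h
    simp at h
  have hd : List.drop j t = c :: List.drop (j+1) t := by
    rw [List.drop_eq_getElem_cons hj]
    congr 1
    have := List.getElem?_eq_getElem hj
    rw [this] at h; exact (Option.some.inj h)
  cases j with
  | zero =>
    rw [PySem.Chars.rfind.go]
    simp at hd
    rw [hd]
    simp
  | succ j =>
    rw [PySem.Chars.rfind.go]
    rw [hd]
    simp

theorem rfind_go_step (t : List Char) (c : Char) (j : Nat) (h : t[j + 1]? ≠ some c) :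
    PySem.Chars.rfind.go t [c] (j + 1) = PySem.Chars.rfind.go t [c] j := by
  rw [PySem.Chars.rfind.go]
  have : ([c].isPrefixOf (List.drop (j+1) t)) = false := by
    rw [prefix_single]
    cases hh : (List.drop (j+1) t).head? with
    | none => simp
    | some x =>
      have : t[j+1]? = some x := by
        rw [← List.head?_drop] at *; exact hh
      simp
      intro he
      exact h (by rw [this, he])
  rw [this]
  simp

def lastIdx (l : List Char) (c : Char) : Nat := l.length - 1 - List.idxOf c l.reverse

theorem rfind_go_down (t : List Char) (c : Char) :
    ∀ (m j : Nat), (∀ i, j < i → i ≤ j + m → t[i]? ≠ some c) →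
    PySem.Chars.rfind.go t [c] (j + m) = PySem.Chars.rfind.go t [c] j := by
  intro m
  induction m with
  | zero => intro j _; rfl
  | succ m ih =>
    intro j h
    have : j + (m + 1) = (j + m) + 1 := by omega
    rw [this, rfind_go_step t c (j + m) (h _ (by omega) (by omega))]
    exact ih j (fun i hi1 hi2 => h i hi1 (by omega))

theorem lastIdx_append_self (l : List Char) (c : Char) : lastIdx (l ++ [c]) c = l.length := by
  simp [lastIdx]

theorem lastIdx_append_ne (l : List Char) (x c : Char) (h : x ≠ c) :
    lastIdx (l ++ [x]) c = lastIdx l c := by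
  simp [lastIdx, h]
  omega

theorem lastIdx_spec (t : List Char) (c : Char) (h : c ∈ t) :
    lastIdx t c < t.length ∧ t[lastIdx t c]? = some c ∧
      ∀ i, lastIdx t c < i → t[i]? ≠ some c := by
  induction t using List.reverseRecOn with
  | nil => simp at h
  | append_singleton l x ih =>
    by_cases hx : x = c
    · subst hx
      rw [lastIdx_append_self]
      refine ⟨by simp, ?_, ?_⟩
      · rw [List.getElem?_append_right le_rfl]
        simp
      · intro i hi
        rw [List.getElem?_eq_none (by simp; omega)]
        simp
    · have hc : c ∈ l := by
        rcases List.mem_append.1 h with h' | h'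
        · exact h'
        · simp at h'; exact absurd h'.symm hx
      obtain ⟨h1, h2, h3⟩ := ih hc
      rw [lastIdx_append_ne l x c hx]
      refine ⟨by simp; omega, ?_, ?_⟩
      · rw [List.getElem?_append_left h1]; exact h2
      · intro i hi
        by_cases hil : i < l.length
        · rw [List.getElem?_append_left hil]; exact h3 i hi
        · by_cases hieq : i = l.length
          · subst hieq
            rw [List.getElem?_append_right le_rfl]
            simp [hx]
          · rw [List.getElem?_eq_none (by simp; omega)]; simp

theorem rfind_single_mem (t : List Char) (c : Char) (h : c ∈ t) :
    PySem.Chars.rfind t [c] = (lastIdx t c : Int) := by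
  obtain ⟨h1, h2, h3⟩ := lastIdx_spec t c h
  have hd : t.length = lastIdx t c + (t.length - lastIdx t c) := by omega
  show PySem.Chars.rfind.go t [c] t.length = _
  rw [hd, rfind_go_down t c _ _ (fun i hi1 _ => h3 i hi1), rfind_go_get t c _ h2]

def maskP (s P : List Char) : List Char := s.map fun x => if x ∈ P then ' ' else x

theorem maskP_keeps (P : List Char) (c : Char) (hc : c ∉ P) (hsp : c ≠ ' ') :
    ∀ x, (if x ∈ P then ' ' else x) = c ↔ x = c := by
  intro x
  by_cases hx : x ∈ P
  · simp [hx]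
    constructor
    · intro he; exact absurd he.symm hsp
    · intro he; subst he; exact absurd hx hc
  · simp [hx]

theorem count_maskP (s P : List Char) (c : Char) (hc : c ∉ P) (hsp : c ≠ ' ') :
    (maskP s P).count c = s.count c := by
  unfold maskP
  rw [List.count_eq_countP, List.count_eq_countP, List.countP_map]
  apply List.countP_congr
  intro x _
  simp [Function.comp, maskP_keeps P c hc hsp x]

theorem mem_maskP (s P : List Char) (c : Char) (hc : c ∉ P) (hsp : c ≠ ' ') :
    c ∈ maskP s P ↔ c ∈ s := by
  unfold maskP
  rw [List.mem_map]
  constructor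
  · rintro ⟨x, hx, he⟩
    rw [maskP_keeps P c hc hsp x] at he; subst he; exact hx
  · intro h; exact ⟨c, h, by simp [hc]⟩

theorem idxOf_map_iff (f : Char → Char) (c : Char) (hf : ∀ x, f x = c ↔ x = c)
    (l : List Char) : List.idxOf c (l.map f) = List.idxOf c l := by
  induction l with
  | nil => simp
  | cons h t ih =>
    simp only [List.map_cons, List.idxOf_cons]
    by_cases hh : h = c
    · subst hh; simp [(hf h).2 rfl]
    · have : f h ≠ c := fun he => hh ((hf h).1 he)
      simp [Bool.cond_eq_ite, beq_iff_eq, this, hh, ih]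

theorem lastIdx_maskP (s P : List Char) (c : Char) (hc : c ∉ P) (hsp : c ≠ ' ') :
    lastIdx (maskP s P) c = lastIdx s c := by
  unfold lastIdx maskP
  rw [← List.map_reverse, idxOf_map_iff _ c (maskP_keeps P c hc hsp)]
  simp

theorem dedup_append_singleton (l : List Char) (x : Char) :
    PySem.List.dedup (l ++ [x])
      = if x ∈ l then PySem.List.dedup l else PySem.List.dedup l ++ [x] := by
  rw [PySem.List.dedup_eq_ofList, PySem.List.dedup_eq_ofList,
      PySem.Set.ofList_eq_foldl, PySem.Set.ofList_eq_foldl, List.foldl_append]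
  simp only [List.foldl_cons, List.foldl_nil]
  have hmem : (List.foldl PySem.Set.add [] l).contains x = true ↔ x ∈ l := by
    rw [PySem.Set.contains_iff, ← PySem.Set.ofList_eq_foldl, PySem.Set.mem_ofList]
  unfold PySem.Set.add
  split_ifs with h1 h2 h2
  · rfl
  · exact absurd (hmem.1 h1) h2
  · exact absurd (hmem.2 h2) h1
  · rfl


def predB (s : List Char) (c : Char) : Bool :=
  decide (1 < s.count c) &&
  decide ((lastIdx s c : Int) - (List.idxOf c s : Int) > (s.count c : Int) - 1)

theorem idxOf_eq_k (s : List Char) (k : Nat) (hk : k < s.length)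
    (h : s[k] ∉ s.take k) : List.idxOf (s[k]) s = k := by
  generalize hx : s[k] = x
  rw [hx] at h
  conv_lhs => rw [← List.take_append_drop k s]
  rw [List.idxOf_append, if_neg h, List.drop_eq_getElem_cons hk, hx, List.idxOf_cons]
  simp [List.length_take, Nat.min_eq_left (le_of_lt hk)]

theorem maskP_step (s F : List Char) (ch : Char) (hch : ch ∉ F) (hsp : ch ≠ ' ') :
    (maskP s F).map (fun x => if x = ch then ' ' else x) = maskP s (F ++ [ch]) := by
  unfold maskP
  rw [List.map_map]
  apply List.map_congr_left
  intro x _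
  simp only [Function.comp]
  by_cases hxF : x ∈ F
  · have : x ∈ F ++ [ch] := List.mem_append.2 (Or.inl hxF)
    simp [hxF, this]
  · by_cases hxc : x = ch
    · subst hxc
      simp [hxF]
    · have : x ∉ F ++ [ch] := by
        simp [List.mem_append, hxF, hxc]
      simp [hxF, hxc, this]

-- ---- A's loop invariant ----
theorem A_loop (s : List Char) : ∀ (k : Nat), k ≤ s.length →
    (List.map (fun i : Nat => (i : Int)) (List.range k)).foldl solutionStepA ([], s)
      = ((PySem.List.dedup ((s.take k).filter (fun x => x != ' '))).filter (predB s),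
         maskP s ((s.take k).filter (fun x => x != ' '))) := by
  intro k
  induction k with
  | zero =>
    intro _
    simp [maskP, PySem.List.dedup_eq_ofList, PySem.Set.ofList_eq_foldl]
  | succ k ih =>
    intro hk1
    have hk : k < s.length := by omega
    rw [List.range_succ]
    simp only [List.map_append, List.foldl_append]
    rw [ih (le_of_lt hk)]
    simp only [List.map_cons, List.map_nil, List.foldl_cons, List.foldl_nil]
    set F := (s.take k).filter (fun x => x != ' ') with hF
    have hFmem : ∀ x, x ∈ F ↔ (x ∈ s.take k ∧ x ≠ ' ') := by
      intro x; simp [hF, List.mem_filter]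
    have hFsp : (' ' : Char) ∉ F := by
      intro hc; exact ((hFmem ' ').1 hc).2 rfl
    have htake : s.take (k+1) = s.take k ++ [s[k]] := by
      rw [List.take_add_one, List.getElem?_eq_getElem hk]; rfl
    have hget : PySem.List.pyGet? (maskP s F) (k : Int)
        = some (if s[k] ∈ F then ' ' else s[k]) := by
      rw [PySem.List.pyGet?_natCast]
      unfold maskP
      rw [List.getElem?_map, List.getElem?_eq_getElem hk]
      rfl
    by_cases hsp : s[k] = ' '
    · -- current character is a space: nothing happens
      have hch : (if s[k] ∈ F then ' ' else s[k]) = ' ' := by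
        by_cases h : s[k] ∈ F <;> simp [hsp]
      rw [solutionStepA, hget]
      simp only [hch]
      have hfil : (s.take (k+1)).filter (fun x => x != ' ') = F := by
        rw [htake, List.filter_append]
        simp only [List.filter_cons, List.filter_nil]
        simp [hsp, ← hF]
      rw [hfil]
      simp
    · by_cases hmem : s[k] ∈ F
      · -- already processed: masked to a space, nothing happens
        have hch : (if s[k] ∈ F then ' ' else s[k]) = ' ' := by simp [hmem]
        rw [solutionStepA, hget]
        simp only [hch]
        have hfil : (s.take (k+1)).filter (fun x => x != ' ') = F ++ [s[k]] := by
          rw [htake, List.filter_append]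
          simp only [List.filter_cons, List.filter_nil]
          simp [hsp, ← hF]
        rw [hfil]
        have h1 : PySem.List.dedup (F ++ [s[k]]) = PySem.List.dedup F := by
          rw [dedup_append_singleton, if_pos hmem]
        have h2 : maskP s (F ++ [s[k]]) = maskP s F := by
          unfold maskP
          apply List.map_congr_left
          intro x _
          by_cases hx : x ∈ F
          · simp [hx, List.mem_append.2 (Or.inl hx)]
          · have : x ∉ F ++ [s[k]] := by
              simp [List.mem_append, hx]
              intro he; subst he; exact hx hmem
            simp [hx, this]
        rw [h1, h2]
        simp
      · -- first occurrence of a fresh non-space character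
        have hch : (if s[k] ∈ F then ' ' else s[k]) = s[k] := by simp [hmem]
        rw [solutionStepA, hget]
        simp only [hch, hsp, ne_eq, not_false_iff, if_pos, count_single]
        have hcount : (maskP s F).count s[k] = s.count s[k] :=
          count_maskP s F s[k] hmem hsp
        have hidx : List.idxOf s[k] s = k := by
          apply idxOf_eq_k s k hk
          intro hc
          exact hmem ((hFmem s[k]).2 ⟨hc, hsp⟩)
        have hfil : (s.take (k+1)).filter (fun x => x != ' ') = F ++ [s[k]] := by
          rw [htake, List.filter_append]
          simp only [List.filter_cons, List.filter_nil]
          simp [hsp, ← hF]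
        have hnotake : s[k] ∉ s.take k := fun hc => hmem ((hFmem s[k]).2 ⟨hc, hsp⟩)
        have hded : PySem.List.dedup (F ++ [s[k]]) = PySem.List.dedup F ++ [s[k]] := by
          rw [dedup_append_singleton, if_neg hmem]
        have hanswer :
            (if (maskP s F).count s[k] > 1 then
              if PySem.Chars.rfind (maskP s F) [s[k]] - (k : Int) > ((maskP s F).count s[k] : Int) - 1 then
                (PySem.List.dedup F).filter (predB s) ++ [s[k]]
              else (PySem.List.dedup F).filter (predB s)
            else (PySem.List.dedup F).filter (predB s))
            = (PySem.List.dedup F).filter (predB s) ++ (if predB s s[k] then [s[k]] else []) := by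
          by_cases hc1 : 1 < s.count s[k]
          · have hmem_s : s[k] ∈ s := by
              rw [← List.count_pos_iff]; omega
            have hrf : PySem.Chars.rfind (maskP s F) [s[k]] = (lastIdx s s[k] : Int) := by
              rw [rfind_single_mem _ _ ((mem_maskP s F s[k] hmem hsp).2 hmem_s),
                  lastIdx_maskP s F s[k] hmem hsp]
            rw [hcount, if_pos hc1, hrf]
            by_cases hc2 : (lastIdx s s[k] : Int) - (k : Int) > (s.count s[k] : Int) - 1
            · have : predB s s[k] = true := by
                unfold predB
                rw [hidx]
                simp only [Bool.and_eq_true, decide_eq_true_iff]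
                exact ⟨hc1, hc2⟩
              rw [if_pos hc2, this]
              simp
            · have : predB s s[k] = false := by
                unfold predB
                rw [hidx]
                simp only [Bool.and_eq_false_iff, decide_eq_false_iff_not]
                right; exact hc2
              rw [if_neg hc2, this]
              simp
          · have : predB s s[k] = false := by
              unfold predB
              simp only [Bool.and_eq_false_iff, decide_eq_false_iff_not]
              left; exact hc1
            rw [hcount, if_neg hc1, this]
            simp
        rw [hanswer]
        rw [replace_single, maskP_step s F s[k] hmem hsp, hfil, hded, List.filter_append]
        simp only [Prod.mk.injEq]
        constructor
        · by_cases hpb : predB s s[k] <;> simp [hpb]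
        · trivial



-- ---- B's loop invariant ----
theorem B_loop (l : List Char) :
    ((PySem.List.enumerate l 0).foldl solutionStepB PySem.Dict.empty).keys
        = PySem.List.dedup (l.filter (fun x => x != ' ')) ∧
      ∀ c, c ≠ ' ' →
        ((PySem.List.enumerate l 0).foldl solutionStepB PySem.Dict.empty).get? c
          = (if c ∈ l then
               some ((List.idxOf c l : Int), (lastIdx l c : Int), (l.count c : Int))
             else none) := by
  induction l using List.reverseRecOn with
  | nil =>
    constructor
    · simp [PySem.List.enumerate, PySem.List.dedup_eq_ofList, PySem.Set.ofList_eq_foldl,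
        PySem.Dict.empty, PySem.Dict.keys]
    · intro c _
      simp [PySem.List.enumerate, PySem.Dict.empty, PySem.Dict.get?]
  | append_singleton l x ih =>
    obtain ⟨ihk, ihg⟩ := ih
    have henum : PySem.List.enumerate (l ++ [x]) 0
        = PySem.List.enumerate l 0 ++ [((l.length : Int), x)] := by
      rw [PySem.List.enumerate_append]
      norm_num [PySem.List.enumerate]
    set D := (PySem.List.enumerate l 0).foldl solutionStepB PySem.Dict.empty with hD
    rw [henum, List.foldl_append]
    simp only [List.foldl_cons, List.foldl_nil, ← hD]
    by_cases hx : x = ' '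
    · -- a space is ignored
      have hstep : solutionStepB D ((l.length : Int), x) = D := by
        unfold solutionStepB
        simp [hx]
      rw [hstep]
      have hfil : (l ++ [x]).filter (fun y => y != ' ') = l.filter (fun y => y != ' ') := by
        rw [List.filter_append]
        simp [hx]
      constructor
      · rw [hfil]; exact ihk
      · intro c hc
        have hcx : c ≠ x := by rw [hx]; exact hc
        have hmm : (c ∈ l ++ [x]) ↔ c ∈ l := by simp [List.mem_append, hcx]
        rw [ihg c hc]
        by_cases hcl : c ∈ l
        · rw [if_pos hcl, if_pos (hmm.2 hcl)]
          rw [List.idxOf_append, if_pos hcl, lastIdx_append_ne l x c (fun he => hcx he.symm),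
            List.count_append]
          simp [List.count_eq_zero, hcx]
        · rw [if_neg hcl, if_neg (fun hc2 => hcl (hmm.1 hc2))]
    · -- a real character
      have hxb : (x == ' ') = false := by simp [hx]
      by_cases hm : x ∈ l
      · have hgx := ihg x hx
        rw [if_pos hm] at hgx
        have hstep : solutionStepB D ((l.length : Int), x)
            = D.insert x ((List.idxOf x l : Int), (l.length : Int), (l.count x : Int) + 1) := by
          unfold solutionStepB
          rw [hxb]
          simp only [Bool.false_eq_true, if_false]
          rw [hgx]
        rw [hstep]
        have hxfil : x ∈ l.filter (fun y => y != ' ') := by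
          rw [List.mem_filter]; simp [hm, hx]
        have hcont : D.contains x = true := by
          rw [PySem.Dict.contains_iff_mem_keys, ihk, PySem.List.dedup_eq_ofList,
            PySem.Set.mem_ofList]
          exact hxfil
        constructor
        · rw [PySem.Dict.keys_insert_of_contains D _ hcont, ihk, List.filter_append]
          simp only [List.filter_cons, List.filter_nil]
          have hxt : (if (x != ' ') = true then [x] else ([] : List Char)) = [x] := by
            simp [hx]
          rw [hxt, dedup_append_singleton]
          simp [hxfil]
        · intro c hc
          by_cases hcx : c = x
          · subst hcx
            rw [PySem.Dict.get?_insert_self, if_pos (by simp)]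
            rw [List.idxOf_append, if_pos hm, lastIdx_append_self, List.count_append]
            simp
          · rw [PySem.Dict.get?_insert_of_ne D _ hcx, ihg c hc]
            have hmm : (c ∈ l ++ [x]) ↔ c ∈ l := by simp [List.mem_append, hcx]
            by_cases hcl : c ∈ l
            · rw [if_pos hcl, if_pos (hmm.2 hcl)]
              rw [List.idxOf_append, if_pos hcl, lastIdx_append_ne l x c (fun he => hcx he.symm),
                List.count_append]
              simp [List.count_eq_zero, hcx]
            · rw [if_neg hcl, if_neg (fun hc2 => hcl (hmm.1 hc2))]
      · have hgx := ihg x hx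
        rw [if_neg hm] at hgx
        have hstep : solutionStepB D ((l.length : Int), x)
            = D.insert x ((l.length : Int), (l.length : Int), 1) := by
          unfold solutionStepB
          rw [hxb]
          simp only [Bool.false_eq_true, if_false]
          rw [hgx]
        rw [hstep]
        have hxfil : x ∉ l.filter (fun y => y != ' ') := by
          rw [List.mem_filter]; simp [hm]
        have hcont : D.contains x = false := by
          rw [Bool.eq_false_iff]
          intro hcon
          rw [PySem.Dict.contains_iff_mem_keys, ihk, PySem.List.dedup_eq_ofList,
            PySem.Set.mem_ofList] at hcon
          exact hxfil hcon
        constructor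
        · rw [PySem.Dict.keys_insert_of_not_contains D _ hcont, ihk, List.filter_append]
          simp only [List.filter_cons, List.filter_nil]
          have hxt : (if (x != ' ') = true then [x] else ([] : List Char)) = [x] := by
            simp [hx]
          rw [hxt, dedup_append_singleton]
          simp [hxfil]
        · intro c hc
          by_cases hcx : c = x
          · subst hcx
            rw [PySem.Dict.get?_insert_self, if_pos (by simp)]
            rw [List.idxOf_append, if_neg hm, lastIdx_append_self, List.count_append]
            simp [List.count_eq_zero.2 hm]
          · rw [PySem.Dict.get?_insert_of_ne D _ hcx, ihg c hc]
            have hmm : (c ∈ l ++ [x]) ↔ c ∈ l := by simp [List.mem_append, hcx]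
            by_cases hcl : c ∈ l
            · rw [if_pos hcl, if_pos (hmm.2 hcl)]
              rw [List.idxOf_append, if_pos hcl, lastIdx_append_ne l x c (fun he => hcx he.symm),
                List.count_append]
              simp [List.count_eq_zero, hcx]
            · rw [if_neg hcl, if_neg (fun hc2 => hcl (hmm.1 hc2))]

-- ---- both sides name the same list ----
theorem lists_eq (s : List Char) :
    (((PySem.List.enumerate s 0).foldl solutionStepB PySem.Dict.empty).items.filter
        (fun q => q.2.2.2 > 1 && q.2.2.1 - q.2.1 > q.2.2.2 - 1)).map (·.1)
      = (PySem.List.dedup (s.filter (fun x => x != ' '))).filter (predB s) := by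
  obtain ⟨hk, hg⟩ := B_loop s
  set D := (PySem.List.enumerate s 0).foldl solutionStepB PySem.Dict.empty with hD
  have hnd : D.keys.Nodup := by
    rw [hk]; exact PySem.List.nodup_dedup _
  rw [PySem.Dict.items_eq_map_keys D hnd (0, 0, 0), List.filter_map, List.map_map]
  have hcongr : D.keys.filter
      ((fun q => q.2.2.2 > 1 && q.2.2.1 - q.2.1 > q.2.2.2 - 1) ∘
        fun k => (k, D.getD k (0, 0, 0)))
      = D.keys.filter (predB s) := by
    apply List.filter_congr
    intro k hkm
    have hkf : k ∈ s.filter (fun x => x != ' ') := by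
      rw [hk, PySem.List.dedup_eq_ofList, PySem.Set.mem_ofList] at hkm
      exact hkm
    rw [List.mem_filter] at hkf
    have hks : k ∈ s := hkf.1
    have hksp : k ≠ ' ' := by simpa using hkf.2
    have hval : D.getD k (0, 0, 0)
        = ((List.idxOf k s : Int), (lastIdx s k : Int), (s.count k : Int)) := by
      rw [PySem.Dict.getD_eq_get?_getD, hg k hksp, if_pos hks]
      rfl
    simp only [Function.comp, hval]
    unfold predB
    simp only [gt_iff_lt]
    congr 1
    · rw [decide_eq_decide]
      exact_mod_cast Iff.rfl
  rw [hcongr]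
  rw [hk]
  simp [Function.comp_def]

-- ===== VERDICT (by name: the statement is the Claim_ definition above) =====
theorem solution_spec : Claim_equal_solution := by
  intro input_string _
  unfold Spec_solution solution solution_alt
  simp only []
  rw [PySem.Chars.len_eq, PySem.List.pyRange_zero_natCast,
    A_loop input_string.toList input_string.toList.length le_rfl, List.take_length,
    lists_eq input_string.toList]
  set L := (PySem.List.dedup (input_string.toList.filter (fun x => x != ' '))).filter
    (predB input_string.toList) with hL
  by_cases hnil : L = []
  · rw [if_pos hnil, if_pos (by rw [PySem.List.sorted_eq_nil_iff]; exact hnil)]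
  · rw [if_neg hnil, if_neg (by rw [PySem.List.sorted_eq_nil_iff]; exact hnil)]
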